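-- pv_equiv track=rewrite | github.com/cmdodge/Poet-identification-project | feature.py | hasCaesura
-- ===== SOURCE A (Python) =====
-- def hasCaesura(poem, featureVector):
-- 	punctuation = '.,:!?;'
-- 	for line in poem:
-- 		if line != "":
-- 			for i in range(len(punctuation)):
-- 				if punctuation[i] in line[0:len(line)-1]:
-- 					#print punctuation[i], line
-- 					featureVector['hasCaesura'] += 1
-- 	return featureVector
-- ===== SOURCE B (Python) =====
-- def hasCaesura(poem, featureVector):
--     # Stage 1: index the poem once - for each character, in how many lines'
--     # interiors (line[:-1]) does it occur?
--     freq = {}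
--     for line in poem:
--         for ch in set(line[:-1]):
--             freq[ch] = freq.get(ch, 0) + 1
--     # Stage 2: six dictionary lookups replace A's per-line punctuation scans.
--     featureVector['hasCaesura'] += sum(freq.get(p, 0) for p in '.,:!?;')
--     return featureVector
-- ===== Notes on version B (the rewrite author's own statement) =====
-- stated objective: alternative
-- what changed: B replaces A's per-line scan over the 6 punctuation characters with a two-stage algorithm: it first builds one frequency dictionary mapping each character to the number of lines whose interior (line[:-1]) contains it, then adds the sum of six dictionary lookups to featureVector['hasCaesura'] in a single update.
-- outside the precondition, e.g. on hasCaesura(['ab'], {}): A returns {}, B raises KeyError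
import Mathlib
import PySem

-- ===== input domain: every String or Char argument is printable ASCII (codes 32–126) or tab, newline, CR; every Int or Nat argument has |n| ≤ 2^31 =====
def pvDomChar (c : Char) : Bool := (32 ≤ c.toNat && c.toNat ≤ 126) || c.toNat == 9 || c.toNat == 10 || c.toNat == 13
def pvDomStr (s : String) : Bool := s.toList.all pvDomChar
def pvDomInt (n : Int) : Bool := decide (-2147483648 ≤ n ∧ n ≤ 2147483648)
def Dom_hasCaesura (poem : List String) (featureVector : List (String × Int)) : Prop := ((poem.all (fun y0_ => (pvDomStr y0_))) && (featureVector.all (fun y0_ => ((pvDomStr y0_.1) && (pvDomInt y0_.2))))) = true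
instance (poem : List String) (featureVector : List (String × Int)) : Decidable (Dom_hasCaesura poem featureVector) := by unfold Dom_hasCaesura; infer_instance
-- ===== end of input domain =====

-- B replaces A's per-line punctuation scans by a two-stage algorithm ('alternative'): one pass
-- builds a frequency dictionary (character -> number of lines whose interior contains it), then
-- six lookups are summed and applied to the dict in ONE update. Both versions mutate and return
-- the same dict object in Python; the equivalence proved here is about the returned association list.

-- ===== PORT A =====
-- punctuation = '.,:!?;'
def hasCaesuraPunct : List Char := ".,:!?;".toList

def hasCaesura (poem : List String) (featureVector : List (String × Int)) : List (String × Int) :=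
  (poem.foldl (fun (d : PySem.Dict String Int) line =>
      if line ≠ "" then
        (PySem.List.pyRange 0 (PySem.List.len hasCaesuraPunct) 1).foldl (fun d i =>
          if PySem.Chars.isIn [PySem.List.pyGetD hasCaesuraPunct i ' ']
               (PySem.List.slice line.toList (some 0) (some (PySem.Str.len line - 1))) then
            d.modify "hasCaesura" 0 (· + 1)      -- featureVector['hasCaesura'] += 1 (key present by Pre_)
          else d) d
      else d)
    (PySem.Dict.mk featureVector)).items

-- ===== PORT B =====
-- freq: for ch in set(line[:-1]): freq[ch] = freq.get(ch, 0) + 1  — then six lookups, one update.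
-- (iterating over a Python set: only the lookup-insensitive frequency dict is built from it)
def hasCaesura_alt (poem : List String) (featureVector : List (String × Int)) : List (String × Int) :=
  let freq : PySem.Dict Char Int := poem.foldl (fun d line =>
      (PySem.Set.ofList (PySem.List.slice line.toList none (some (-1)))).foldl
        (fun d ch => d.insert ch (d.getD ch 0 + 1)) d) PySem.Dict.empty
  let total : Int := (".,:!?;".toList.map (fun p => freq.getD p 0)).sum
  ((PySem.Dict.mk featureVector).modify "hasCaesura" 0 (· + total)).items

-- ===== PRECONDITION & SPEC =====
-- Pre_ excludes featureVector without a 'hasCaesura' key (there Python's '+=' raises KeyError —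
-- always in B, and in A as soon as any interior punctuation occurs), and association lists with
-- duplicate keys, which do not arise from a Python dict.
def Pre_hasCaesura (poem : List String) (featureVector : List (String × Int)) : Prop :=
  "hasCaesura" ∈ featureVector.map Prod.fst ∧ (featureVector.map Prod.fst).Nodup
instance (poem : List String) (featureVector : List (String × Int)) : Decidable (Pre_hasCaesura poem featureVector) := by unfold Pre_hasCaesura; infer_instance

def pvWitness_hasCaesura : List String × (List (String × Int)) :=
  (["a,b c.", "", "x!"], [("hasCaesura", 0), ("lines", 3)])

def Spec_hasCaesura (poem : List String) (featureVector : List (String × Int)) (out : List (String × Int)) : Prop := out = hasCaesura_alt poem featureVector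
instance (poem : List String) (featureVector : List (String × Int)) (out : List (String × Int)) : Decidable (Spec_hasCaesura poem featureVector out) := by unfold Spec_hasCaesura; infer_instance

-- ===== CLAIM (what is proved, stated in full; the proofs are below) =====
def Claim_equal_hasCaesura : Prop := ∀ (poem : List String) (featureVector : List (String × Int)), Dom_hasCaesura poem featureVector → Pre_hasCaesura poem featureVector → Spec_hasCaesura poem featureVector (hasCaesura poem featureVector)

-- ===== LEMMAS AND PROOFS =====

-- 'c in s' for a single character is membership
lemma isIn_singleton_eq_contains (c : Char) (s : List Char) :
    PySem.Chars.isIn [c] s = (PySem.Set.ofList s).contains c := by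
  by_cases h : c ∈ s
  · have h1 : PySem.Chars.isIn [c] s = true := by
      rw [PySem.Chars.isIn_iff_infix]
      obtain ⟨t1, t2, rfl⟩ := List.append_of_mem h
      exact ⟨t1, t2, by simp⟩
    have h2 : (PySem.Set.ofList s).contains c = true := by
      rw [PySem.Set.contains_iff, PySem.Set.mem_ofList]; exact h
    rw [h1, h2]
  · have h1 : PySem.Chars.isIn [c] s = false := by
      rw [PySem.Chars.isIn_eq_false_iff]
      intro hinf
      exact h (List.singleton_sublist.mp hinf.sublist)
    have h2 : (PySem.Set.ofList s).contains c = false := by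
      rw [← Bool.not_eq_true, PySem.Set.contains_iff, PySem.Set.mem_ofList]; exact h
    rw [h1, h2]

-- A's inner pass over the 6 punctuation indices counts the distinct interior punctuation chars
lemma count_eq (I : List Char) :
    ((PySem.List.pyRange 0 (PySem.List.len hasCaesuraPunct) 1).countP
        (fun i => PySem.Chars.isIn [PySem.List.pyGetD hasCaesuraPunct i ' '] I) : Int)
      = (hasCaesuraPunct.countP (fun p => (PySem.Set.ofList I).contains p) : Int) := by
  have hr : PySem.List.pyRange 0 (PySem.List.len hasCaesuraPunct) 1 = [0, 1, 2, 3, 4, 5] := by decide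
  have hmap : ([0, 1, 2, 3, 4, 5] : List Int).map (fun i => PySem.List.pyGetD hasCaesuraPunct i ' ')
      = hasCaesuraPunct := by decide
  rw [hr]
  have : (([0, 1, 2, 3, 4, 5] : List Int).countP
        (fun i => PySem.Chars.isIn [PySem.List.pyGetD hasCaesuraPunct i ' '] I))
      = hasCaesuraPunct.countP (fun c => PySem.Chars.isIn [c] I) := by
    rw [← hmap, List.countP_map]; rfl
  rw [this]
  congr 2
  funext c
  exact isIn_singleton_eq_contains c I

-- two successive updates of the same key collapse
lemma dict_modify_modify (d : PySem.Dict String Int) (k : String) (v0 : Int) (f g : Int → Int) :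
    (d.modify k v0 f).modify k v0 g = d.modify k v0 (fun x => g (f x)) := by
  simp [PySem.Dict.modify, PySem.Dict.getD_insert_self, PySem.Dict.insert_insert_self]

-- re-inserting the present value is the identity (keys unique)
lemma dict_insert_getD_self (d : PySem.Dict String Int) (k : String)
    (hnd : d.keys.Nodup) (h : d.contains k = true) : d.insert k (d.getD k 0) = d := by
  apply PySem.Dict.ext
  rw [PySem.Dict.items_insert_of_contains _ _ h]
  conv_rhs => rw [← List.map_id d.items]
  apply List.map_congr_left
  intro p hp
  by_cases hk : p.1 = k
  · have hpm : (k, p.2) ∈ d.items := by rw [← hk]; exact hp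
    have hv := PySem.Dict.getD_of_mem_items d hpm hnd 0
    cases p
    simp_all
  · simp [hk]

lemma dict_modify_add_zero (d : PySem.Dict String Int) (k : String)
    (hnd : d.keys.Nodup) (h : d.contains k = true) : d.modify k 0 (· + 0) = d := by
  show d.insert k (d.getD k 0 + 0) = d
  rw [Int.add_zero]
  exact dict_insert_getD_self d k hnd h

-- A's conditional-increment loop over any index list is one update by the count
lemma foldl_if_modify (l : List Int) (p : Int → Bool) (d : PySem.Dict String Int) (k : String)
    (hnd : d.keys.Nodup) (h : d.contains k = true) :
    l.foldl (fun d i => if p i then d.modify k 0 (· + 1) else d) d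
      = d.modify k 0 (· + (l.countP p : Int)) := by
  induction l generalizing d with
  | nil =>
    rw [List.foldl_nil, List.countP_nil, Int.natCast_zero]
    exact (dict_modify_add_zero d k hnd h).symm
  | cons a l ih =>
    by_cases hp : p a
    · have hn2 : (d.modify k 0 (· + (1 : Int))).keys.Nodup :=
        PySem.Dict.nodup_keys_insert _ _ _ hnd
      have hc2 : (d.modify k 0 (· + (1 : Int))).contains k = true := by
        rw [PySem.Dict.contains_modify]; simp
      rw [List.foldl_cons, if_pos hp, ih _ hn2 hc2, dict_modify_modify]
      have hcp : (a :: l).countP p = l.countP p + 1 := by simp [hp]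
      congr 1
      funext x
      rw [hcp]
      push_cast
      ring
    · rw [List.foldl_cons, if_neg hp, ih _ hnd h]
      have hcp : (a :: l).countP p = l.countP p := by simp [hp]
      rw [hcp]

-- the two interior slices coincide: line[0:len(line)-1] = line[:-1] = dropLast
lemma slice_interior (line : String) :
    PySem.List.slice line.toList (some 0) (some (PySem.Str.len line - 1))
      = PySem.List.slice line.toList none (some (-1)) := by
  rw [PySem.List.slice_to_neg_one]
  by_cases hl : line.toList = []
  · rw [hl]; simp [PySem.List.slice]
  · have hlen : 1 ≤ line.toList.length := by
      cases hc : line.toList with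
      | nil => exact absurd hc hl
      | cons a t => simp
    have h1 : PySem.Str.len line - 1 = ((line.toList.length - 1 : Nat) : Int) := by
      rw [PySem.Str.len_eq]; omega
    rw [h1, PySem.List.slice_zero_start, PySem.List.slice_to_natCast, List.dropLast_eq_take]

-- B's per-line distinct-interior count, as an abbreviation for the lemmas below
def lineCount (line : String) : Int :=
  (hasCaesuraPunct.countP
    (fun p => (PySem.Set.ofList (PySem.List.slice line.toList none (some (-1)))).contains p) : Int)

-- A's whole fold is one update by the sum of the per-line counts
lemma fold_poem (poem : List String) (d : PySem.Dict String Int)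
    (hnd : d.keys.Nodup) (h : d.contains "hasCaesura" = true) :
    poem.foldl (fun (d : PySem.Dict String Int) line =>
      if line ≠ "" then
        (PySem.List.pyRange 0 (PySem.List.len hasCaesuraPunct) 1).foldl (fun d i =>
          if PySem.Chars.isIn [PySem.List.pyGetD hasCaesuraPunct i ' ']
               (PySem.List.slice line.toList (some 0) (some (PySem.Str.len line - 1))) then
            d.modify "hasCaesura" 0 (· + 1)
          else d) d
      else d) d
    = d.modify "hasCaesura" 0 (· + (poem.map lineCount).sum) := by
  induction poem generalizing d with
  | nil =>
    simp only [List.foldl_nil, List.map_nil, List.sum_nil]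
    exact (dict_modify_add_zero d _ hnd h).symm
  | cons line rest ih =>
    have hstep : (if line ≠ "" then
        (PySem.List.pyRange 0 (PySem.List.len hasCaesuraPunct) 1).foldl (fun d i =>
          if PySem.Chars.isIn [PySem.List.pyGetD hasCaesuraPunct i ' ']
               (PySem.List.slice line.toList (some 0) (some (PySem.Str.len line - 1))) then
            d.modify "hasCaesura" 0 (· + 1)
          else d) d
      else d) = d.modify "hasCaesura" 0 (· + lineCount line) := by
      by_cases hl : line = ""
      · subst hl
        rw [if_neg (by simp)]
        have hz : lineCount "" = 0 := by decide
        rw [hz]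
        exact (dict_modify_add_zero d _ hnd h).symm
      · rw [if_pos hl, foldl_if_modify _ _ d _ hnd h]
        unfold lineCount
        rw [← count_eq, slice_interior]
    have hn2 : (d.modify "hasCaesura" 0 (· + lineCount line)).keys.Nodup :=
      PySem.Dict.nodup_keys_insert _ _ _ hnd
    have hc2 : (d.modify "hasCaesura" 0 (· + lineCount line)).contains "hasCaesura" = true := by
      rw [PySem.Dict.contains_modify]; simp
    rw [List.foldl_cons, hstep, ih _ hn2 hc2, dict_modify_modify]
    congr 1
    funext x
    simp only [List.map_cons, List.sum_cons]
    ring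

-- B's frequency dict: each lookup is the sum over lines of that char's per-line (0/1) count
lemma freq_getD (poem : List String) (d : PySem.Dict Char Int) (p : Char) :
    (poem.foldl (fun d line =>
        (PySem.Set.ofList (PySem.List.slice line.toList none (some (-1)))).foldl
          (fun d ch => d.insert ch (d.getD ch 0 + 1)) d) d).getD p 0
      = d.getD p 0 + (poem.map (fun line =>
          ((PySem.Set.ofList (PySem.List.slice line.toList none (some (-1)))).count p : Int))).sum := by
  induction poem generalizing d with
  | nil => simp
  | cons line rest ih =>
    rw [List.foldl_cons, ih, PySem.Dict.getD_foldl_insert_add_one]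
    simp only [List.map_cons, List.sum_cons]
    ring

-- in a deduplicated list, count is 0/1-membership
lemma count_ofList_eq_ite (I : List Char) (p : Char) :
    ((PySem.Set.ofList I).count p : Int)
      = if (PySem.Set.ofList I).contains p then 1 else 0 := by
  by_cases h : (PySem.Set.ofList I).contains p = true
  · have hm : p ∈ PySem.Set.ofList I := by rw [PySem.Set.contains_iff] at h; exact h
    rw [List.count_eq_one_of_mem (PySem.Set.nodup_ofList I) hm, if_pos h]
    rfl
  · have hm : p ∉ PySem.Set.ofList I := by rw [PySem.Set.contains_iff] at h; exact h
    rw [List.count_eq_zero.mpr hm, if_neg h]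
    rfl

-- double counting: summing lookups over the 6 punctuation chars = summing per-line counts
lemma sum_swap_punct (poem : List String) :
    (hasCaesuraPunct.map (fun p => (poem.map (fun line =>
        ((PySem.Set.ofList (PySem.List.slice line.toList none (some (-1)))).count p : Int))).sum)).sum
      = (poem.map lineCount).sum := by
  induction poem with
  | nil =>
    simp
  | cons line rest ih =>
    simp only [List.map_cons, List.sum_cons]
    rw [show (fun p => ((PySem.Set.ofList (PySem.List.slice line.toList none (some (-1)))).count p : Int)
          + (rest.map (fun l =>
              ((PySem.Set.ofList (PySem.List.slice l.toList none (some (-1)))).count p : Int))).sum)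
        = (fun p => ((PySem.Set.ofList (PySem.List.slice line.toList none (some (-1)))).count p : Int)
          + (fun p => (rest.map (fun l =>
              ((PySem.Set.ofList (PySem.List.slice l.toList none (some (-1)))).count p : Int))).sum) p)
        from rfl,
      PySem.List.sum_map_add_int, ih]
    congr 1
    have : (hasCaesuraPunct.map (fun p =>
        ((PySem.Set.ofList (PySem.List.slice line.toList none (some (-1)))).count p : Int))).sum
        = (hasCaesuraPunct.map (fun p =>
          if (PySem.Set.ofList (PySem.List.slice line.toList none (some (-1)))).contains p
          then (1 : Int) else 0)).sum := by
      congr 1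
      exact List.map_congr_left (fun p _ => count_ofList_eq_ite _ p)
    rw [this, PySem.List.sum_map_ite_one_zero]
    rfl

-- ===== VERDICT (by name: the statement is the Claim_ definition above) =====
theorem hasCaesura_spec : Claim_equal_hasCaesura := by
  intro poem fv _ hpre
  obtain ⟨hmem, hnd⟩ := hpre
  have hkeys : (PySem.Dict.mk fv).keys = fv.map Prod.fst := rfl
  have hnd' : (PySem.Dict.mk fv).keys.Nodup := by rw [hkeys]; exact hnd
  have hcont : (PySem.Dict.mk fv).contains "hasCaesura" = true := by
    rw [PySem.Dict.contains_iff_mem_keys, hkeys]; exact hmem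
  show hasCaesura poem fv = hasCaesura_alt poem fv
  unfold hasCaesura hasCaesura_alt
  rw [fold_poem poem _ hnd' hcont]
  congr 2
  funext x
  congr 1
  rw [← sum_swap_punct poem]
  congr 1
  apply List.map_congr_left
  intro p _
  rw [freq_getD, PySem.Dict.getD_empty, zero_add]
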